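-- pv_equiv track=rewrite | github.com/Cuongnm105/autorecon | test/testscripts/hhh.py | matchresult
-- ===== SOURCE A (Python) =====
-- def matchresult(df,index,returnfai):
--         result1=[]
--         for i in range(0,len(df)):
--             if i not in index:
--                 result1.append("Match")
--             else:
--                 result1.append(returnfai[index.index(i)])
--         return result1
-- ===== SOURCE B (Python) =====
-- def matchresult(df, index, returnfai):
--     # Scatter: start from all-"Match", write returnfai values at their target rows.
--     result = ["Match"] * len(df)
--     for idx, val in reversed(list(zip(index, returnfai))):
--         if 0 <= idx < len(df):
--             result[idx] = val
--     return result
-- ===== Notes on version B (the rewrite author's own statement) =====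
-- stated objective: faster
-- what changed: Replaces the per-row gather (an 'i in index' membership test plus a list.index scan for every row, O(n*m)) with a single scatter pass: fill an all-"Match" buffer of length len(df) and write the zipped (index, returnfai) pairs into it in reverse so the first occurrence of a duplicate index wins.
import Mathlib
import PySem

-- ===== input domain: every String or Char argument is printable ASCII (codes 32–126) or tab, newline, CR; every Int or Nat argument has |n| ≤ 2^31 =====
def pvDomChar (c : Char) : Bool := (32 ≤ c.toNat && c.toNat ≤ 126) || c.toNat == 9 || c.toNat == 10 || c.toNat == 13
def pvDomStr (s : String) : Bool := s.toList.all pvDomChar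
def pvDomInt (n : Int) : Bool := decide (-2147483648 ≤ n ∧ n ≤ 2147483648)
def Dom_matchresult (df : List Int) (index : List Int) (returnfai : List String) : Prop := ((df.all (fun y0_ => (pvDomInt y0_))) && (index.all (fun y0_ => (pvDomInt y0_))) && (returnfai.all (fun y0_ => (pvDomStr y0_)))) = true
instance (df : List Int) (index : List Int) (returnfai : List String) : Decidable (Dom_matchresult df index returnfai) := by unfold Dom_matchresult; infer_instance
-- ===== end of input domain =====

-- B replaces A's per-row gather (membership test + list.index scan per row) by a single
-- scatter pass over the zipped (index, returnfai) pairs; return value equivalence only.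

-- ===== PORT A =====
def matchresult (df : List Int) (index : List Int) (returnfai : List String) : List String :=
  (PySem.List.pyRange 0 (df.length : Int) 1).foldl
    (fun result1 i =>
      if i ∉ index then result1 ++ ["Match"]
      else result1 ++ [((PySem.List.index? index i).bind
            (fun p => PySem.List.pyGet? returnfai (p : Int))).getD ""])
    []

-- ===== PORT B =====
def matchresult_alt (df : List Int) (index : List Int) (returnfai : List String) : List String :=
  ((index.zip returnfai).reverse).foldl
    (fun result p =>
      if 0 ≤ p.1 ∧ p.1 < (df.length : Int) then result.set p.1.toNat p.2 else result)
    (List.replicate df.length "Match")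

-- ===== PRECONDITION & SPEC =====
-- Pre_ excludes exactly the inputs on which A raises IndexError: some row number i occurs in
-- index with its first occurrence at a position ≥ len(returnfai).
def Pre_matchresult (df : List Int) (index : List Int) (returnfai : List String) : Prop :=
  ∀ i ∈ index, (0 ≤ i ∧ i < (df.length : Int)) →
    (PySem.List.index? index i).getD 0 < returnfai.length

instance (df : List Int) (index : List Int) (returnfai : List String) : Decidable (Pre_matchresult df index returnfai) := by unfold Pre_matchresult; infer_instance

def pvWitness_matchresult : List Int × List Int × List String := ([0, 1], [1], ["fail"])

def Spec_matchresult (df : List Int) (index : List Int) (returnfai : List String) (out : List String) : Prop := out = matchresult_alt df index returnfai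
instance (df : List Int) (index : List Int) (returnfai : List String) (out : List String) : Decidable (Spec_matchresult df index returnfai out) := by unfold Spec_matchresult; infer_instance

-- ===== CLAIM (what is proved, stated in full; the proofs are below) =====
def Claim_equal_matchresult : Prop := ∀ (df : List Int) (index : List Int) (returnfai : List String), Dom_matchresult df index returnfai → Pre_matchresult df index returnfai → Spec_matchresult df index returnfai (matchresult df index returnfai)

-- ===== LEMMAS AND PROOFS =====

-- what A appends for row i
def pvAVal (index : List Int) (rf : List String) (i : Int) : String :=
  if i ∉ index then "Match"
  else ((PySem.List.index? index i).bind (fun p => PySem.List.pyGet? rf (p : Int))).getD ""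

theorem pvA_eq_map (df index : List Int) (rf : List String) :
    matchresult df index rf = (List.range df.length).map (fun k : Nat => pvAVal index rf (k : Int)) := by
  unfold matchresult pvAVal
  rw [PySem.List.pyRange_one]
  simp only [Int.sub_zero, Int.toNat_natCast, zero_add]
  have hbody : (fun (acc : List String) (i : Int) =>
      if i ∉ index then acc ++ ["Match"]
      else acc ++ [((PySem.List.index? index i).bind
        (fun p => PySem.List.pyGet? rf (p:Int))).getD ""])
    = fun acc i => acc ++ [if i ∉ index then "Match"
      else ((PySem.List.index? index i).bind
        (fun p => PySem.List.pyGet? rf (p:Int))).getD ""] := by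
    funext acc i; split <;> rfl
  rw [hbody, PySem.List.foldl_append_singleton_eq_map]
  simp only [List.nil_append, List.map_map]
  rfl

-- B's scatter step (forward foldr form)
def pvStep (n : Nat) (res : List String) (p : Int × String) : List String :=
  if 0 ≤ p.1 ∧ p.1 < (n : Int) then res.set p.1.toNat p.2 else res

theorem pvAlt_eq_foldr (df index : List Int) (rf : List String) :
    matchresult_alt df index rf =
      (index.zip rf).foldr (fun p res => pvStep df.length res p)
        (List.replicate df.length "Match") := by
  unfold matchresult_alt pvStep
  rw [List.foldl_reverse]

theorem pvFoldr_length (n : Nat) (ps : List (Int × String)) (res : List String) :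
    (ps.foldr (fun p r => pvStep n r p) res).length = res.length := by
  induction ps with
  | nil => rfl
  | cons p ps ih =>
    simp only [List.foldr_cons, pvStep] at ih ⊢
    split
    · rw [List.length_set]; exact ih
    · exact ih

theorem pvFoldr_getElem? (n : Nat) (ps : List (Int × String)) (res : List String)
    (hres : res.length = n) (k : Nat) (hk : k < n) :
    (ps.foldr (fun p r => pvStep n r p) res)[k]? =
      match ps.find? (fun p => p.1 == (k : Int)) with
      | some p => some p.2
      | none => res[k]? := by
  induction ps with
  | nil => rfl
  | cons p ps ih =>
    have hlen : (ps.foldr (fun p r => pvStep n r p) res).length = n := by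
      rw [pvFoldr_length]; exact hres
    simp only [List.foldr_cons, List.find?_cons, pvStep] at ih hlen ⊢
    by_cases h : p.1 = (k : Int)
    · have hrange : (0 ≤ p.1 ∧ p.1 < (n : Int)) := by constructor <;> omega
      have htn : p.1.toNat = k := by omega
      rw [if_pos hrange, htn]
      simp [h, hlen, hk]
    · have hne : (p.1 == (k : Int)) = false := by simp [h]
      rw [hne]
      split
      · rename_i hr
        have hnk : p.1.toNat ≠ k := by omega
        rw [List.getElem?_set_ne hnk, ih]
      · exact ih

theorem pvFind_zip_none (index : List Int) (rf : List String) (i : Int) (h : i ∉ index) :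
    (index.zip rf).find? (fun p => p.1 == i) = none := by
  induction index generalizing rf with
  | nil => simp
  | cons a l ih =>
    cases rf with
    | nil => simp
    | cons b rb =>
      have ha : a ≠ i := by intro hh; exact h (by simp [hh])
      simp only [List.zip_cons_cons, List.find?_cons]
      simp only [show (a == i) = false by simp [ha]]
      exact ih rb (fun hm => h (List.mem_cons_of_mem a hm))

theorem pvFind_zip_some (index : List Int) (rf : List String) (i : Int) (k : Nat)
    (hidx : PySem.List.index? index i = some k) (hk : k < rf.length) :
    (index.zip rf).find? (fun p => p.1 == i) = some (i, rf.getD k "") := by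
  induction index generalizing rf k with
  | nil => simp [PySem.List.index?] at hidx
  | cons a l ih =>
    by_cases h : a = i
    · subst h
      rw [PySem.List.index?_cons_self] at hidx
      obtain rfl : k = 0 := by simpa using hidx.symm
      cases rf with
      | nil => simp at hk
      | cons b rb => simp [List.zip_cons_cons]
    · rw [PySem.List.index?_cons_of_ne l h] at hidx
      obtain ⟨k', hl, rfl⟩ : ∃ k', PySem.List.index? l i = some k' ∧ k' + 1 = k := by
        cases hcase : PySem.List.index? l i with
        | none => rw [hcase] at hidx; simp at hidx
        | some k' => rw [hcase] at hidx; exact ⟨k', rfl, by simpa using hidx⟩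
      cases rf with
      | nil => simp at hk
      | cons b rb =>
        simp only [List.zip_cons_cons, List.find?_cons,
          show (a == i) = false by simp [h]]
        have := ih rb k' hl (by simpa using hk)
        simpa using this

-- ===== VERDICT (by name: the statement is the Claim_ definition above) =====
theorem matchresult_spec : Claim_equal_matchresult := by
  intro df index rf _ hpre
  unfold Spec_matchresult
  rw [pvA_eq_map, pvAlt_eq_foldr]
  apply List.ext_getElem?
  intro k
  by_cases hk : k < df.length
  · rw [pvFoldr_getElem? df.length _ _ (by simp) k hk]
    rw [List.getElem?_map]
    simp only [List.getElem?_range, hk]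
    by_cases hmem : (k : Int) ∈ index
    · have hsome : (PySem.List.index? index (k : Int)).isSome := by
        rw [PySem.List.index?_isSome_iff]; exact hmem
      obtain ⟨p, hp⟩ := Option.isSome_iff_exists.mp hsome
      have hplen : p < rf.length := by
        have := hpre (k : Int) hmem ⟨by omega, by exact_mod_cast hk⟩
        rw [hp] at this; simpa using this
      rw [pvFind_zip_some index rf (k : Int) p hp hplen]
      have hp' : List.idxOf? (k : Int) index = some p := by simpa using hp
      simp [pvAVal, hmem, hp', hplen, List.getD_eq_getElem?_getD]
    · rw [pvFind_zip_none index rf (k : Int) hmem]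
      simp [pvAVal, hmem, hk]
  · have h2 : ((index.zip rf).foldr (fun p res => pvStep df.length res p)
        (List.replicate df.length "Match")).length = df.length := by
      rw [pvFoldr_length, List.length_replicate]
    rw [List.getElem?_eq_none (by simpa using hk),
        List.getElem?_eq_none (by rw [h2]; omega)]
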